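-- pv_equiv track=rewrite | github.com/25007839d/my_cloud | pd/beam.py | domain
-- ===== SOURCE A (Python) =====
-- def domain(x):
--     a=''
--     b=''
--     for i in x:
--
--         if i =='@':
--             a+=i
--         elif a=='@':
--                 b+=i
--
--     return b
-- ===== SOURCE B (Python) =====
-- def domain(x):
--     parts = x.split('@')
--     return parts[1] if len(parts) > 1 else ''
-- ===== Notes on version B (the rewrite author's own statement) =====
-- stated objective: simpler
-- what changed: Replaces the char-by-char accumulator/flag loop with a single str.split on the separator and indexing the second segment.
import Mathlib
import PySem

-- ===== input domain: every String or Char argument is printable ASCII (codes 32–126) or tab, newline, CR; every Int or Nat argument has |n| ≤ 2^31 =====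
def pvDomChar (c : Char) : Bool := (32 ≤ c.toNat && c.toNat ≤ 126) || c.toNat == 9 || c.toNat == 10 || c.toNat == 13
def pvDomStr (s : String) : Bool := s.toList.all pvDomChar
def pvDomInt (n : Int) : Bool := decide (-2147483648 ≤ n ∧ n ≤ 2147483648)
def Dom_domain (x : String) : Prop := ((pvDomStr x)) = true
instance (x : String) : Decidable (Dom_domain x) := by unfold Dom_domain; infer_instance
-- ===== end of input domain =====

-- B replaces A's char-by-char accumulator/flag loop by split('@') and taking the second segment (simpler).

-- ===== PORT A =====
-- the loop body: state (a, b), a the '@'-flag string, b the collected chars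
def domainStep (ab : List Char × List Char) (i : Char) : List Char × List Char :=
  if i = '@' then (ab.1 ++ ['@'], ab.2)
  else if ab.1 = ['@'] then (ab.1, ab.2 ++ [i])
  else ab

def domain (x : String) : String :=
  String.mk ((x.toList.foldl domainStep ([], [])).2)

-- ===== PORT B =====
def domain_alt (x : String) : String :=
  match PySem.Chars.splitOn x.toList ['@'] with
  | _ :: p1 :: _ => String.mk p1
  | _ => ""

-- ===== PRECONDITION & SPEC =====
def Spec_domain (x : String) (out : String) : Prop := out = domain_alt x
instance (x : String) (out : String) : Decidable (Spec_domain x out) := by unfold Spec_domain; infer_instance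

-- ===== CLAIM (what is proved, stated in full; the proofs are below) =====
def Claim_equal_domain : Prop := ∀ (x : String), Dom_domain x → Spec_domain x (domain x)

-- ===== LEMMAS AND PROOFS =====

/-- Structural characterization of splitting on the single char '@'. -/
def pieces : List Char → List (List Char)
  | [] => [[]]
  | c :: rest => if c = '@' then [] :: pieces rest else (pieces rest).modifyHead (c :: ·)

theorem pieces_ne_nil (l : List Char) : pieces l ≠ [] := by
  cases l with
  | nil => simp [pieces]
  | cons c rest =>
    simp only [pieces]
    split
    · simp
    · cases h : pieces rest with
      | nil => exact absurd h (pieces_ne_nil rest)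
      | cons a t => simp [List.modifyHead]

theorem splitOn_go_eq (fuel : Nat) (l cur : List Char) (acc : List (List Char))
    (h : l.length < fuel) :
    PySem.Chars.splitOn.go ['@'] fuel l cur acc
      = acc.reverse ++ (pieces l).modifyHead (cur.reverse ++ ·) := by
  induction fuel generalizing l cur acc with
  | zero => omega
  | succ fuel ih =>
    cases l with
    | nil =>
      simp [PySem.Chars.splitOn.go, pieces]
    | cons c rest =>
      rw [PySem.Chars.splitOn.go]
      by_cases hc : c = '@'
      · subst hc
        have hp : (['@'] : List Char).isPrefixOf ('@' :: rest) = true := by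
          simp [List.isPrefixOf]
        rw [if_pos hp]
        simp only [List.length_cons] at h
        simp only [List.length_cons, List.length_nil, List.drop_succ_cons, List.drop_zero]
        rw [ih rest [] (cur.reverse :: acc) (by omega)]
        cases hpe : pieces rest with
        | nil => exact absurd hpe (pieces_ne_nil rest)
        | cons a t =>
          simp [pieces, hpe, List.modifyHead]
      · have hp : (['@'] : List Char).isPrefixOf (c :: rest) = false := by
          simp [List.isPrefixOf]
          exact fun h => hc h.symm
        rw [if_neg (by simp [hp])]
        simp only [List.length_cons] at h
        rw [ih rest (c :: cur) acc (by omega)]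
        simp only [pieces, if_neg hc, List.modifyHead_modifyHead]
        congr 1
        cases hpe : pieces rest with
        | nil => exact absurd hpe (pieces_ne_nil rest)
        | cons a t => simp [List.modifyHead, Function.comp]

theorem splitOn_eq_pieces (l : List Char) :
    PySem.Chars.splitOn l ['@'] = pieces l := by
  unfold PySem.Chars.splitOn
  rw [splitOn_go_eq (l.length + 1) l [] [] (by omega)]
  cases h : pieces l with
  | nil => exact absurd h (pieces_ne_nil l)
  | cons a t => simp [List.modifyHead]

/-- the second state of A's fold is dead: once a has ≥ 2 chars, b never grows. -/
theorem foldl_dead (l : List Char) (a b : List Char) (ha : 2 ≤ a.length) :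
    (l.foldl domainStep (a, b)).2 = b := by
  induction l generalizing a b with
  | nil => rfl
  | cons c rest ih =>
    simp only [List.foldl_cons, domainStep]
    by_cases hc : c = '@'
    · rw [if_pos hc]; exact ih (a ++ ['@']) b (by simp; omega)
    · rw [if_neg hc, if_neg (by intro h; rw [h] at ha; simp at ha)]
      exact ih a b ha

/-- after the first '@': b collects the head piece of the rest. -/
theorem foldl_at (l : List Char) (b : List Char) :
    (l.foldl domainStep (['@'], b)).2 = b ++ (pieces l).headD [] := by
  induction l generalizing b with
  | nil => simp [pieces]
  | cons c rest ih =>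
    simp only [List.foldl_cons, domainStep]
    by_cases hc : c = '@'
    · rw [if_pos hc, hc]
      rw [foldl_dead rest (['@'] ++ ['@']) b (by simp)]
      simp [pieces]
    · rw [if_neg hc]
      simp only [if_true]
      rw [ih (b ++ [c])]
      simp only [pieces, if_neg hc]
      cases hpe : pieces rest with
      | nil => exact absurd hpe (pieces_ne_nil rest)
      | cons a t => simp [List.modifyHead]

/-- before any '@': b ends up with the piece between the first two '@'s. -/
theorem foldl_start (l : List Char) (b : List Char) :
    (l.foldl domainStep ([], b)).2 = b ++ (pieces l).getD 1 [] := by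
  induction l generalizing b with
  | nil => simp [pieces]
  | cons c rest ih =>
    simp only [List.foldl_cons, domainStep]
    by_cases hc : c = '@'
    · rw [if_pos hc]
      simp only [List.nil_append]
      rw [foldl_at rest b]
      simp only [pieces, if_pos hc]
      cases hpe : pieces rest with
      | nil => exact absurd hpe (pieces_ne_nil rest)
      | cons a t => simp
    · rw [if_neg hc, if_neg (by simp)]
      rw [ih b]
      simp only [pieces, if_neg hc]
      cases hpe : pieces rest with
      | nil => exact absurd hpe (pieces_ne_nil rest)
      | cons a t => cases t <;> simp [List.modifyHead]

-- ===== VERDICT (by name: the statement is the Claim_ definition above) =====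
theorem domain_spec : Claim_equal_domain := by
  intro x _
  unfold Spec_domain domain domain_alt
  rw [splitOn_eq_pieces, foldl_start x.toList []]
  cases hpe : pieces x.toList with
  | nil => exact absurd hpe (pieces_ne_nil x.toList)
  | cons a t => cases t <;> simp <;> rfl
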